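-- pv_equiv track=rewrite | github.com/GT4SD/domain-adaptive-patent-classifier | src/dapc/classifier_multilingual.py | create_lang_sets
-- ===== SOURCE A (Python) =====
-- from typing import Dict, List, Union
--
-- def create_lang_sets(lang: List[str]) -> Dict[str, List[int]]:
--     """Sort text indices based on their language.
--
--     Args:
--         lang: list of languages for each input text.
--
--     Returns:
--         dictionary with all the indices for each language.
--     """
--
--     languages = set(lang)
--
--     language_sets = {}
--
--     for language in languages:
--         language_sets[language] = [i for i, la in enumerate(lang) if la == language]
--
--     language_sets["all"] = list(range(len(lang)))
--     language_sets["non-en"] = [i for i, la in enumerate(lang) if la != "en"]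
--
--     return language_sets
-- ===== SOURCE B (Python) =====
-- def create_lang_sets(lang):
--     """One linear pass over enumerate(lang): group indices by language as we go
--     (setdefault/append), collecting the non-'en' indices in the same pass, then
--     assign the 'all' and 'non-en' keys last."""
--     language_sets = {}
--     non_en = []
--     for i, la in enumerate(lang):
--         language_sets.setdefault(la, []).append(i)
--         if la != "en":
--             non_en.append(i)
--     language_sets["all"] = list(range(len(lang)))
--     language_sets["non-en"] = non_en
--     return language_sets
-- ===== Notes on version B (the rewrite author's own statement) =====
-- stated objective: faster
-- what changed: B builds all language buckets in one pass over enumerate(lang) with setdefault/append (collecting non-'en' indices in the same pass) instead of A's one full scan of lang per distinct language.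
import Mathlib
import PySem

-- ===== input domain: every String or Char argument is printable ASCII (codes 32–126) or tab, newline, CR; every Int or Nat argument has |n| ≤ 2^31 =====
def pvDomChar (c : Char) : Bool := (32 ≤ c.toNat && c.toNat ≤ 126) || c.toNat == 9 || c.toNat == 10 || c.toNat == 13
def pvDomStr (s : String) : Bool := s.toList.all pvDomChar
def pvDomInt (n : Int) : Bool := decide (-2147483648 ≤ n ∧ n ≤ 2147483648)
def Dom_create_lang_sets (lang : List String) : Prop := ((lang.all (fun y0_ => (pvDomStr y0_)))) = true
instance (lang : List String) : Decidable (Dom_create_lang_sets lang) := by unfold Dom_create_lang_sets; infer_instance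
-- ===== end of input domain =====

-- B replaces A's per-language full rescan of lang with ONE pass over enumerate(lang)
-- that groups indices by language as it goes (objective: faster, O(n·k) → O(n)).
-- The Python dict is modelled as an insertion-ordered association list; a Python set's
-- hash iteration order is modelled as first-occurrence order (outputs are compared as dicts).

-- ===== PORT A =====
def create_lang_sets (lang : List String) : List (String × List Int) :=
  let languages : PySem.Set String := PySem.Set.ofList lang
  let language_sets : PySem.Dict String (List Int) :=
    languages.foldl
      (fun d language =>
        d.insert language
          (((PySem.List.enumerate lang).filter (fun p => p.2 == language)).map (fun p => p.1)))
      PySem.Dict.empty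
  let language_sets := language_sets.insert "all" (PySem.List.pyRange 0 (lang.length : Int) 1)
  let language_sets :=
    language_sets.insert "non-en"
      (((PySem.List.enumerate lang).filter (fun p => p.2 != "en")).map (fun p => p.1))
  language_sets.items

-- ===== PORT B =====
def create_lang_sets_alt (lang : List String) : List (String × List Int) :=
  let st :=
    (PySem.List.enumerate lang).foldl
      (fun (st : PySem.Dict String (List Int) × List Int) p =>
        (st.1.modify p.2 [] (fun l => l ++ [p.1]),
         if p.2 != "en" then st.2 ++ [p.1] else st.2))
      (PySem.Dict.empty, [])
  let language_sets := st.1.insert "all" (PySem.List.pyRange 0 (lang.length : Int) 1)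
  let language_sets := language_sets.insert "non-en" st.2
  language_sets.items

-- ===== PRECONDITION & SPEC =====
def Spec_create_lang_sets (lang : List String) (out : List (String × List Int)) : Prop := out = create_lang_sets_alt lang
instance (lang : List String) (out : List (String × List Int)) : Decidable (Spec_create_lang_sets lang out) := by unfold Spec_create_lang_sets; infer_instance

-- ===== CLAIM (what is proved, stated in full; the proofs are below) =====
def Claim_equal_create_lang_sets : Prop := ∀ (lang : List String), Dom_create_lang_sets lang → Spec_create_lang_sets lang (create_lang_sets lang)

-- ===== LEMMAS AND PROOFS =====

-- B's grouping pass, restated as a modify-fold over key/value pairs (swap the enumerate pair).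
theorem pv_fold_swap (lang : List String) :
    (PySem.List.enumerate lang).foldl
      (fun (d : PySem.Dict String (List Int)) p => d.modify p.2 [] (fun l => l ++ [p.1]))
      PySem.Dict.empty
    = ((PySem.List.enumerate lang).map (fun p => (p.2, p.1))).foldl
      (fun (d : PySem.Dict String (List Int)) q => d.modify q.1 [] (fun l => l ++ [q.2]))
      PySem.Dict.empty := by
  rw [List.foldl_map]

-- B's one-pass grouping dict has exactly A's per-language buckets, at every key.
theorem pv_getD_group (lang : List String) (u : String) :
    ((PySem.List.enumerate lang).foldl
      (fun (d : PySem.Dict String (List Int)) p => d.modify p.2 [] (fun l => l ++ [p.1]))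
      PySem.Dict.empty).getD u []
    = ((PySem.List.enumerate lang).filter (fun p => p.2 == u)).map (fun p => p.1) := by
  rw [pv_fold_swap, PySem.Dict.getD_foldl_modify_append]
  simp [List.filter_map, Function.comp_def]

-- B's one-pass grouping dict equals A's insert-per-distinct-language dict.
theorem pv_group_eq (lang : List String) :
    (PySem.Set.ofList lang).foldl
      (fun (d : PySem.Dict String (List Int)) language =>
        d.insert language
          (((PySem.List.enumerate lang).filter (fun p => p.2 == language)).map (fun p => p.1)))
      PySem.Dict.empty
    = (PySem.List.enumerate lang).foldl
        (fun (d : PySem.Dict String (List Int)) p => d.modify p.2 [] (fun l => l ++ [p.1]))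
        PySem.Dict.empty := by
  apply PySem.Dict.ext
  have hA := PySem.Dict.items_foldl_insert_fresh (PySem.Set.ofList lang) (fun u => u)
    (fun u => ((PySem.List.enumerate lang).filter (fun p => p.2 == u)).map (fun p => p.1))
    PySem.Dict.empty (by intro a _; simp [pysem]) (by simp [PySem.Set.nodup_ofList])
  have hkeys :
      ((PySem.List.enumerate lang).foldl
        (fun (d : PySem.Dict String (List Int)) p => d.modify p.2 [] (fun l => l ++ [p.1]))
        PySem.Dict.empty).keys = PySem.Set.ofList lang := by
    rw [pv_fold_swap]
    have := PySem.Dict.keys_foldl_modify_key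
      ((PySem.List.enumerate lang).map (fun p => (p.2, p.1))) (fun q => q.1) []
      (fun _ q => fun l => l ++ [q.2]) (PySem.Dict.empty (κ := String) (ν := List Int))
    rw [this]
    have hm : (((PySem.List.enumerate lang).map (fun p => (p.2, p.1))).map (fun q => q.1))
        = lang := by
      simp [List.map_map, Function.comp_def, PySem.List.map_snd_enumerate]
    rw [hm]
    rfl
  have hnd :
      ((PySem.List.enumerate lang).foldl
        (fun (d : PySem.Dict String (List Int)) p => d.modify p.2 [] (fun l => l ++ [p.1]))
        PySem.Dict.empty).keys.Nodup := by
    rw [hkeys]; exact PySem.Set.nodup_ofList lang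
  have hB := PySem.Dict.items_eq_map_keys _ hnd []
  rw [hA, hB, hkeys]
  have hemp : (PySem.Dict.empty : PySem.Dict String (List Int)).items = [] := rfl
  rw [hemp, List.nil_append]
  apply List.map_congr_left
  intro u _
  exact congrArg (fun v => (u, v)) (pv_getD_group lang u).symm

-- ===== VERDICT (by name: the statement is the Claim_ definition above) =====
theorem create_lang_sets_spec : Claim_equal_create_lang_sets := by
  intro lang _
  show create_lang_sets lang = create_lang_sets_alt lang
  simp only [create_lang_sets, create_lang_sets_alt]
  have hp := PySem.List.foldl_prod_mk
      (fun (d : PySem.Dict String (List Int)) (p : Int × String) => d.modify p.2 [] (fun l => l ++ [p.1]))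
      (fun (ne : List Int) (p : Int × String) => if p.2 != "en" then ne ++ [p.1] else ne)
      (PySem.List.enumerate lang) PySem.Dict.empty []
  have hq := PySem.List.foldl_append_if (fun p : Int × String => p.2 != "en")
      (fun p : Int × String => p.1) (PySem.List.enumerate lang) []
  rw [hp, hq, pv_group_eq]
  simp
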